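-- pv_equiv track=rewrite | github.com/bigjosh/sha-circuit | optimize-nands.py | optimize_and_simplification
-- ===== SOURCE A (Python) =====
-- def is_output_label(label):
--     """Check if a label is a circuit output (should not be replaced/deleted)."""
--     if label.startswith("OUTPUT-"):
--         return True
--     if label.startswith("FINAL-H") and "-ADD-B" in label:
--         parts = label.split("-ADD-B")
--         if len(parts) == 2 and "-T" not in parts[1]:
--             return True
--     return False
--
-- def optimize_and_simplification(gates):
--     """Optimize AND(x, x) = x patterns."""
--     gate_map = {label: (a, b) for label, a, b in gates}
--
--     replacements = {}
--     for label, a, b in gates: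
--         if a == b and a in gate_map:
--             inner_a, inner_b = gate_map[a]
--             if inner_a == inner_b:
--                 if not is_output_label(label):
--                     replacements[label] = inner_a
--
--     if not replacements:
--         return gates
--
--     def resolve(label):
--         seen = set()
--         while label in replacements:
--             if label in seen:
--                 break
--             seen.add(label)
--             label = replacements[label]
--         return label
--
--     optimized = []
--     for label, a, b in gates:
--         if label in replacements:
--             continue
--         optimized.append((label, resolve(a), resolve(b)))
--
--     return optimized
-- ===== SOURCE B (Python) =====
-- def is_output_label(label):
--     """Check if a label is a circuit output (should not be replaced/deleted)."""
--     if label.startswith("OUTPUT-"):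
--         return True
--     if label.startswith("FINAL-H") and "-ADD-B" in label:
--         parts = label.split("-ADD-B")
--         if len(parts) == 2 and "-T" not in parts[1]:
--             return True
--     return False
--
-- def optimize_and_simplification(gates):
--     """Optimize AND(x, x) = x patterns (staged: precompute a full resolution table)."""
--     gate_map = {label: (a, b) for label, a, b in gates}
--
--     # labels whose gate has identical inputs (AND(x, x) shape)
--     squares = {label for label, (x, y) in gate_map.items() if x == y}
--
--     replacements = {label: gate_map[a][0]
--                     for label, a, b in gates
--                     if a == b and a in squares and not is_output_label(label)}
--
--     # Precompute the resolved value of every replaced label in one staged pass;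
--     # a chain walk is a BOUNDED for loop (a chain of distinct uncached keys
--     # cannot be longer than the table), with results cached for later starts.
--     cache = {}
--     limit = len(replacements) + 1
--     for start in replacements:
--         if start in cache:
--             continue
--         path = []
--         label = start
--         for _ in range(limit):
--             if label in cache or label not in replacements or label in path:
--                 break
--             path.append(label)
--             label = replacements[label]
--         if label in path:
--             # replacement cycle: labels strictly before the re-entry point
--             # resolve to it; labels on the cycle resolve to themselves (left
--             # uncached, the lookup default below handles them)
--             for x in path[:path.index(label)]:
--                 cache[x] = label
--         else:
--             end = cache.get(label, label)
--             for x in path: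
--                 cache[x] = end
--
--     return [(label, cache.get(a, a), cache.get(b, b))
--             for label, a, b in gates if label not in replacements]
-- ===== Notes on version B (the rewrite author's own statement) =====
-- stated objective: alternative
-- what changed: A re-walks a replacement chain from scratch inside resolve() for every gate input; B precomputes a full resolution table in one staged pass over the replacement keys (bounded walk per key, results cached, cycle entries left to the lookup default) and then emits the output with pure dict lookups in a comprehension.
import Mathlib
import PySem

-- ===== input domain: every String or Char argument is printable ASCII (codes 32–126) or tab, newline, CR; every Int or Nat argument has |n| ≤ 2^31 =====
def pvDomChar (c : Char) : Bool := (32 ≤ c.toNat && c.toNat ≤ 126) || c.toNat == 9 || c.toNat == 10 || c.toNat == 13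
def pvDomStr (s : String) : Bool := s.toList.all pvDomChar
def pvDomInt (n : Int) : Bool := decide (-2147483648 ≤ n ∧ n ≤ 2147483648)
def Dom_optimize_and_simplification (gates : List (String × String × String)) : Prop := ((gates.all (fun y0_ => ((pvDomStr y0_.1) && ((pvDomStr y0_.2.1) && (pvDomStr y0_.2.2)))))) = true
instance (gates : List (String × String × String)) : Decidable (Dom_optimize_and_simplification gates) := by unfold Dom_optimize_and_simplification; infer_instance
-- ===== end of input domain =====

-- B replaces A's per-call fresh chain walk by a staged precomputation: one bounded walk
-- per replacement key fills a shared resolution table once, then a pure comprehension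
-- emits the output via table lookups. Same return value (alternative algorithm).

-- strict-decrease fact used by the termination proof of A's walk recursion
theorem pvFilterLt {α : Type} (l : List α) (p q : α → Bool) (a : α)
    (himp : ∀ x, q x = true → p x = true) (ha : a ∈ l) (hp : p a = true) (hq : q a = false) :
    (l.filter q).length < (l.filter p).length := by
  have hle : ∀ m : List α, (m.filter q).length ≤ (m.filter p).length := by
    intro m
    rw [← List.countP_eq_length_filter, ← List.countP_eq_length_filter]
    exact List.countP_mono_left (fun x _ => himp x)
  obtain ⟨u, v, rfl⟩ := List.append_of_mem ha
  rw [List.filter_append, List.filter_append, List.filter_cons, List.filter_cons, hp, hq]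
  simp only [List.length_append, List.length_cons, Bool.false_eq_true, if_false, if_true]
  have h1 := hle u; have h2 := hle v; omega

-- ===== PORT A =====

-- helper is_output_label (identical text in both Pythons, shared)
def pvIsOutputLabel (label : String) : Bool :=
  if PySem.Str.startswith label "OUTPUT-" then
    true
  else if PySem.Str.startswith label "FINAL-H" && PySem.Str.isIn "-ADD-B" label then
    match PySem.Str.split? label "-ADD-B" with
    | some parts => decide (parts.length = 2) && !(PySem.Str.isIn "-T" (parts.getD 1 ""))
    | none => false  -- unreachable: the separator "-ADD-B" is non-empty
  else
    false

-- gate_map dict comprehension (identical line in both Pythons, shared)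
def pvGateMap (gates : List (String × String × String)) : PySem.Dict String (String × String) :=
  gates.foldl (fun d g => d.insert g.1 (g.2.1, g.2.2)) PySem.Dict.empty

-- A's `replacements` loop (nested ifs, in A's order)
def pvReplA (gates : List (String × String × String))
    (gm : PySem.Dict String (String × String)) : PySem.Dict String String :=
  gates.foldl (fun r g =>
    if g.2.1 == g.2.2 then
      match gm.get? g.2.1 with
      | some p =>
          if p.1 == p.2 then
            if pvIsOutputLabel g.1 then r else r.insert g.1 p.1
          else r
      | none => r
    else r) PySem.Dict.empty

-- A's `resolve`: walk the chain with a fresh `seen` set, stop on a repeat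
def pvResolveA (repl : PySem.Dict String String) (seen : PySem.Set String)
    (label : String) : String :=
  match h : repl.get? label with
  | none => label
  | some nxt =>
      if hc : PySem.Set.contains seen label = true then label
      else pvResolveA repl (PySem.Set.add seen label) nxt
termination_by (repl.keys.filter (fun k => !(PySem.Set.contains seen k))).length
decreasing_by
  apply pvFilterLt _ _ _ label
  · intro x hx
    simp only [Bool.not_eq_eq_eq_not, Bool.not_true] at hx ⊢
    cases hcx : PySem.Set.contains seen x with
    | false => rfl
    | true =>
      exfalso
      have hmem : x ∈ PySem.Set.add seen label :=
        (PySem.Set.mem_add _ _ _).2 (Or.inl ((PySem.Set.contains_iff _ _).1 hcx))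
      rw [(PySem.Set.contains_iff _ _).2 hmem] at hx
      exact Bool.noConfusion hx
  · by_contra hk
    rw [(PySem.Dict.get?_eq_none_iff_not_mem_keys repl label).2 (fun hm => hk hm)] at h
    cases h
  · simp only [Bool.not_eq_eq_eq_not, Bool.not_true]
    exact Bool.not_eq_true _ ▸ (by simpa using hc)
  · simp only [Bool.not_eq_eq_eq_not, Bool.not_true, Bool.not_eq_false]
    exact (PySem.Set.contains_iff _ _).2 ((PySem.Set.mem_add _ _ _).2 (Or.inr rfl))

-- A: main function
def optimize_and_simplification (gates : List (String × String × String)) :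
    List (String × String × String) :=
  let gm := pvGateMap gates
  let repl := pvReplA gates gm
  if repl.size == 0 then gates
  else
    gates.foldl (fun acc g =>
      if repl.contains g.1 then acc
      else acc ++ [(g.1, pvResolveA repl PySem.Set.empty g.2.1,
                         pvResolveA repl PySem.Set.empty g.2.2)]) []

-- ===== PORT B =====

-- B's `squares` set comprehension over gate_map.items()
def pvSquares (gm : PySem.Dict String (String × String)) : PySem.Set String :=
  PySem.Set.ofList ((gm.items.filter (fun kv => kv.2.1 == kv.2.2)).map (fun kv => kv.1))

-- B's `replacements` dict comprehension (single combined condition, squares-set test)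
def pvReplB (gates : List (String × String × String))
    (gm : PySem.Dict String (String × String)) (sq : PySem.Set String) :
    PySem.Dict String String :=
  gates.foldl (fun r g =>
    if g.2.1 == g.2.2 && PySem.Set.contains sq g.2.1 && !(pvIsOutputLabel g.1) then
      -- gate_map[a] cannot raise here: a ∈ squares ⊆ gate_map's keys
      r.insert g.1 (gm.getD g.2.1 ("", "")).1
    else r) PySem.Dict.empty

-- B's inner bounded `for _ in range(limit)` loop body (early exit via the done flag)
def pvWalkStep (repl cache : PySem.Dict String String)
    (st : List String × String × Bool) : List String × String × Bool :=
  if st.2.2 then st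
  else if cache.contains st.2.1 || !(repl.contains st.2.1) || st.1.contains st.2.1 then
    (st.1, st.2.1, true)
  else
    -- replacements[label] cannot raise: membership was checked just above
    (st.1 ++ [st.2.1], repl.getD st.2.1 "", false)

-- B's per-key fill: one bounded chain walk, then cache the resolved path
def pvFillOne (repl cache : PySem.Dict String String) (start : String) :
    PySem.Dict String String :=
  if cache.contains start then cache
  else
    let w := (PySem.List.pyRange 0 ((repl.size : Int) + 1) 1).foldl
      (fun st _ => pvWalkStep repl cache st) (([] : List String), start, false)
    let path := w.1
    let label := w.2.1
    if path.contains label then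
      match PySem.List.index? path label with
      | some i =>
          -- path[:path.index(label)] : slice with the found index
          (PySem.List.slice path none (some (i : Int))).foldl
            (fun c x => c.insert x label) cache
      | none => cache  -- unreachable: label ∈ path
    else
      let e := cache.getD label label
      path.foldl (fun c x => c.insert x e) cache

-- B: main function (staged: full resolution table first, then a pure comprehension)
def optimize_and_simplification_alt (gates : List (String × String × String)) :
    List (String × String × String) :=
  let gm := pvGateMap gates
  let sq := pvSquares gm
  let repl := pvReplB gates gm sq
  let cache := repl.keys.foldl (fun c k => pvFillOne repl c k) PySem.Dict.empty
  (gates.filter (fun g => !(repl.contains g.1))).map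
    (fun g => (g.1, cache.getD g.2.1 g.2.1, cache.getD g.2.2 g.2.2))

-- ===== PRECONDITION & SPEC =====
def Spec_optimize_and_simplification (gates : List (String × String × String)) (out : List (String × String × String)) : Prop := out = optimize_and_simplification_alt gates
instance (gates : List (String × String × String)) (out : List (String × String × String)) : Decidable (Spec_optimize_and_simplification gates out) := by unfold Spec_optimize_and_simplification; infer_instance

-- ===== CLAIM (what is proved, stated in full; the proofs are below) =====
def Claim_equal_optimize_and_simplification : Prop := ∀ (gates : List (String × String × String)), Dom_optimize_and_simplification gates → Spec_optimize_and_simplification gates (optimize_and_simplification gates)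

-- ===== LEMMAS AND PROOFS =====

-- n-step iteration of the replacement map, and reachability along it
def pvIter (R : PySem.Dict String String) : Nat → String → Option String
  | 0, l => some l
  | n+1, l =>
      match R.get? l with
      | none => none
      | some nxt => pvIter R n nxt

def pvReach (R : PySem.Dict String String) (a b : String) : Prop :=
  ∃ n, pvIter R n a = some b

def pvNoCyc (R : PySem.Dict String String) (k : String) : Prop :=
  ∀ n : Nat, pvIter R (n+1) k ≠ some k

-- cache invariant: every cached value is A's resolve value, and cached labels are acyclic
def pvInv (R cache : PySem.Dict String String) : Prop :=
  ∀ k v, cache.get? k = some v → v = pvResolveA R PySem.Set.empty k ∧ pvNoCyc R k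

-- cache monotonicity
def pvMono (c c' : PySem.Dict String String) : Prop :=
  ∀ k v, c.get? k = some v → c'.get? k = some v

-- `pvLinks R p t`: p is a chain under R whose last element steps to t
def pvLinks (R : PySem.Dict String String) : List String → String → Prop
  | [], _ => True
  | x :: rest, t => R.get? x = some (rest.headD t) ∧ pvLinks R rest t

-- one-step unfolding lemmas for pvResolveA
theorem pvResolveA_none (R : PySem.Dict String String) (seen : PySem.Set String) (label : String)
    (hnone : R.get? label = none) : pvResolveA R seen label = label := by
  rw [pvResolveA.eq_def, hnone]

theorem pvResolveA_stop (R : PySem.Dict String String) (seen : PySem.Set String) (label nxt : String)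
    (hsome : R.get? label = some nxt) (hc : PySem.Set.contains seen label = true) :
    pvResolveA R seen label = label := by
  have hm : label ∈ seen := (PySem.Set.contains_iff _ _).1 hc
  rw [pvResolveA.eq_def, hsome]
  simp [hc, hm]

theorem pvResolveA_go (R : PySem.Dict String String) (seen : PySem.Set String) (label nxt : String)
    (hsome : R.get? label = some nxt) (hc : PySem.Set.contains seen label = false) :
    pvResolveA R seen label = pvResolveA R (PySem.Set.add seen label) nxt := by
  have hm : label ∉ seen := fun hmem => by
    rw [(PySem.Set.contains_iff _ _).2 hmem] at hc; cases hc
  rw [pvResolveA.eq_def, hsome]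
  simp [hc, hm]

theorem pvIter_add (R : PySem.Dict String String) (m n : Nat) (a : String) :
    pvIter R (m + n) a =
      match pvIter R m a with
      | none => none
      | some b => pvIter R n b := by
  induction m generalizing a with
  | zero => simp [pvIter]
  | succ k ih =>
    have : k + 1 + n = (k + n) + 1 := by omega
    rw [this]
    simp only [pvIter]
    cases h : R.get? a with
    | none => rfl
    | some nxt => exact ih nxt

theorem pvReach_trans (R : PySem.Dict String String) {a b z : String}
    (h1 : pvReach R a b) (h2 : pvReach R b z) : pvReach R a z := by
  obtain ⟨m, hm⟩ := h1; obtain ⟨n, hn⟩ := h2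
  exact ⟨m + n, by rw [pvIter_add, hm]; exact hn⟩

theorem pvReach_step (R : PySem.Dict String String) {a b z : String}
    (h : R.get? a = some b) (h2 : pvReach R b z) : pvReach R a z := by
  obtain ⟨n, hn⟩ := h2
  exact ⟨n + 1, by simp only [pvIter, h]; exact hn⟩

theorem pvStepClosed (R : PySem.Dict String String) (S : String → Prop)
    (hS : ∀ a, S a → ∀ b, R.get? a = some b → S b) :
    ∀ n a z, S a → pvIter R n a = some z → S z := by
  intro n
  induction n with
  | zero => intro a z ha h; simp [pvIter] at h; exact h ▸ ha
  | succ k ih =>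
    intro a z ha h
    simp only [pvIter] at h
    cases hg : R.get? a with
    | none => rw [hg] at h; cases h
    | some b => rw [hg] at h; exact ih b z (hS a ha b hg) h

theorem pvContainsAdd (s : PySem.Set String) (l x : String) :
    PySem.Set.contains (PySem.Set.add s l) x = (PySem.Set.contains s x || x == l) := by
  by_cases hx : x ∈ PySem.Set.add s l
  · rw [(PySem.Set.contains_iff _ _).2 hx]
    rcases (PySem.Set.mem_add _ _ _).1 hx with h | h
    · rw [(PySem.Set.contains_iff _ _).2 h]; rfl
    · simp [h]
  · have h1 : PySem.Set.contains (PySem.Set.add s l) x = false :=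
      Bool.eq_false_iff.2 (fun hc => hx ((PySem.Set.contains_iff _ _).1 hc))
    have h2 : x ∉ s := fun hm => hx ((PySem.Set.mem_add _ _ _).2 (Or.inl hm))
    have h3 : x ≠ l := fun he => hx ((PySem.Set.mem_add _ _ _).2 (Or.inr he))
    have h4 : PySem.Set.contains s x = false :=
      Bool.eq_false_iff.2 (fun hc => h2 ((PySem.Set.contains_iff _ _).1 hc))
    simp [h1, h4, h3]

theorem pvContainsEmpty (x : String) :
    PySem.Set.contains (PySem.Set.empty : PySem.Set String) x = false := by
  have hx : x ∉ (PySem.Set.empty : PySem.Set String) := by intro h; cases h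
  exact Bool.eq_false_iff.2 (fun hc => hx ((PySem.Set.contains_iff _ _).1 hc))

theorem pvKey (R : PySem.Dict String String) (seen seen' : PySem.Set String) (label : String)
    (h : ∀ x, pvReach R label x → PySem.Set.contains seen x = PySem.Set.contains seen' x) :
    pvResolveA R seen label = pvResolveA R seen' label := by
  induction seen, label using pvResolveA.induct R generalizing seen' with
  | case1 seen label hnone =>
    rw [pvResolveA_none R seen label hnone, pvResolveA_none R seen' label hnone]
  | case2 seen label nxt hsome hc =>
    have hc' : PySem.Set.contains seen' label = true := by
      rw [← h label ⟨0, rfl⟩]; exact hc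
    rw [pvResolveA_stop R seen label nxt hsome hc, pvResolveA_stop R seen' label nxt hsome hc']
  | case3 seen label nxt hsome hc ih =>
    have hc0 : PySem.Set.contains seen label = false := Bool.not_eq_true _ ▸ (by simpa using hc)
    have hc0' : PySem.Set.contains seen' label = false := by rw [← h label ⟨0, rfl⟩]; exact hc0
    rw [pvResolveA_go R seen label nxt hsome hc0, pvResolveA_go R seen' label nxt hsome hc0']
    apply ih
    intro x hx
    rw [pvContainsAdd, pvContainsAdd, h x (pvReach_step R hsome hx)]

theorem pvLinks_closed (R : PySem.Dict String String) (q : List String) (t : String)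
    (h : pvLinks R q t) : ∀ a ∈ q, ∀ b, R.get? a = some b → b ∈ q ∨ b = t := by
  induction q with
  | nil => intro a ha; cases ha
  | cons x rest ih =>
    intro a ha b hb
    rcases List.mem_cons.1 ha with rfl | hmem
    · rw [h.1] at hb
      cases hb
      cases rest with
      | nil => exact Or.inr rfl
      | cons y ys => exact Or.inl (List.mem_cons.2 (Or.inr (List.mem_cons.2 (Or.inl rfl))))
    · rcases ih h.2 a hmem b hb with h1 | h1
      · exact Or.inl (List.mem_cons.2 (Or.inr h1))
      · exact Or.inr h1

theorem pvLinks_reach (R : PySem.Dict String String) (q : List String) (t : String)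
    (h : pvLinks R q t) : ∀ a ∈ q, pvReach R a t := by
  induction q with
  | nil => intro a ha; cases ha
  | cons x rest ih =>
    intro a ha
    rcases List.mem_cons.1 ha with rfl | hmem
    · cases rest with
      | nil => exact pvReach_step R h.1 ⟨0, rfl⟩
      | cons y ys =>
        exact pvReach_step R h.1 (ih h.2 y (List.mem_cons.2 (Or.inl rfl)))
    · exact ih h.2 a hmem

theorem pvLinks_isSome (R : PySem.Dict String String) (q : List String) (t : String)
    (h : pvLinks R q t) : ∀ a ∈ q, ∃ b, R.get? a = some b := by
  induction q with
  | nil => intro a ha; cases ha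
  | cons x rest ih =>
    intro a ha
    rcases List.mem_cons.1 ha with rfl | hmem
    · exact ⟨_, h.1⟩
    · exact ih h.2 a hmem

theorem pvLinks_snoc (R : PySem.Dict String String) (p : List String) (label nxt : String)
    (h : pvLinks R p label) (hl : R.get? label = some nxt) :
    pvLinks R (p ++ [label]) nxt := by
  induction p with
  | nil => exact ⟨hl, trivial⟩
  | cons x rest ih =>
    refine ⟨?_, ih h.2⟩
    rw [h.1]
    congr 1
    cases rest <;> rfl

theorem pvHeadD_snoc (p : List String) (l x : String) : (p ++ [l]).headD x = p.headD l := by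
  cases p <;> rfl

theorem pvAlong (R : PySem.Dict String String) (q : List String) (t : String)
    (seen : PySem.Set String) (h : pvLinks R q t) (hnd : q.Nodup)
    (hdisj : ∀ a ∈ q, PySem.Set.contains seen a = false) :
    pvResolveA R seen (q.headD t) = pvResolveA R (PySem.Set.update seen q) t := by
  induction q generalizing seen with
  | nil => rfl
  | cons x rest ih =>
    have hx : PySem.Set.contains seen x = false := hdisj x (List.mem_cons.2 (Or.inl rfl))
    have heq : pvResolveA R seen x = pvResolveA R (PySem.Set.add seen x) (rest.headD t) :=
      pvResolveA_go R seen x (rest.headD t) h.1 hx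
    rw [List.headD_cons, heq]
    have hrec := ih (PySem.Set.add seen x) h.2 (List.nodup_cons.1 hnd).2 (fun a ha => by
      rw [pvContainsAdd, hdisj a (List.mem_cons.2 (Or.inr ha))]
      have hne : a ≠ x := fun he => (List.nodup_cons.1 hnd).1 (he ▸ ha)
      simp [hne])
    exact hrec

theorem pvFoldlInsertGet (l : List String) (v : String) (c : PySem.Dict String String)
    (k : String) :
    (l.foldl (fun c x => c.insert x v) c).get? k = if k ∈ l then some v else c.get? k := by
  induction l generalizing c with
  | nil => simp
  | cons x xs ih =>
    simp only [List.foldl_cons, ih, List.mem_cons]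
    by_cases hk : k ∈ xs
    · simp [hk]
    · by_cases hkx : k = x
      · subst hkx
        simp [hk, PySem.Dict.get?_insert_self]
      · simp [hk, hkx, PySem.Dict.get?_insert_of_ne c v hkx]

-- the resolve value of the head of a links path that contains its endpoint is the endpoint
theorem pvCycleHead (R : PySem.Dict String String) (path : List String) (label : String)
    (h : pvLinks R path label) (hnd : path.Nodup) (hmem : label ∈ path) :
    pvResolveA R PySem.Set.empty (path.headD label) = label := by
  have halong := pvAlong R path label PySem.Set.empty h hnd (fun a _ => pvContainsEmpty a)
  rw [halong]
  obtain ⟨b, hb⟩ := pvLinks_isSome R path label h label hmem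
  apply pvResolveA_stop R _ label b hb
  exact (PySem.Set.contains_iff _ _).2 ((PySem.Set.mem_update _ _ _).2 (Or.inr hmem))

-- cycle ending: the walk revisits `label`
theorem pvCycleEnd (R : PySem.Dict String String) (path : List String) (label : String)
    (h : pvLinks R path label) (hnd : path.Nodup) (hmem : label ∈ path) :
    pvResolveA R PySem.Set.empty (path.headD label) = label ∧
    ∀ x ∈ path.takeWhile (fun z => z != label),
      pvResolveA R PySem.Set.empty x = label ∧ pvNoCyc R x := by
  refine ⟨pvCycleHead R path label h hnd hmem, ?_⟩
  induction path with
  | nil => intro x hx; cases hx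
  | cons y rest ih =>
    by_cases hy : y = label
    · subst hy
      intro x hx
      simp only [List.takeWhile_cons, bne_self_eq_false, Bool.false_eq_true, if_false] at hx
      cases hx
    · have hlabmem : label ∈ rest := by
        rcases List.mem_cons.1 hmem with h1 | h1
        · exact absurd h1.symm hy
        · exact h1
      intro x hx
      have hbne : (y != label) = true := bne_iff_ne.2 hy
      simp only [List.takeWhile_cons, hbne, if_true] at hx
      rcases List.mem_cons.1 hx with rfl | hx'
      · constructor
        · have := pvCycleHead R (x :: rest) label h hnd hmem
          rwa [List.headD_cons] at this
        · intro n hcy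
          simp only [pvIter, h.1] at hcy
          have hreach : pvReach R (rest.headD label) x := ⟨n, hcy⟩
          have hclosed : ∀ a, a ∈ rest → ∀ b, R.get? a = some b → b ∈ rest := by
            intro a ha b hb
            rcases pvLinks_closed R rest label h.2 a ha b hb with h1 | h1
            · exact h1
            · exact h1 ▸ hlabmem
          have hstart : rest.headD label ∈ rest := by
            cases rest with
            | nil => cases hlabmem
            | cons z zs => exact List.mem_cons.2 (Or.inl rfl)
          have hx_in : x ∈ rest :=
            pvStepClosed R (· ∈ rest) hclosed n (rest.headD label) x hstart hcy
          exact (List.nodup_cons.1 hnd).1 hx_in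
      · exact ih h.2 (List.nodup_cons.1 hnd).2 hlabmem x hx'

-- terminal / cache-hit ending: `label` is not on the walked path
theorem pvLineEnd (R : PySem.Dict String String) (path : List String) (label res : String)
    (h : pvLinks R path label) (hnd : path.Nodup) (hmem : label ∉ path)
    (hres : pvResolveA R PySem.Set.empty label = res) (hnc : pvNoCyc R label) :
    ∀ x ∈ path, pvResolveA R PySem.Set.empty x = res ∧ pvNoCyc R x := by
  induction path with
  | nil => intro x hx; cases hx
  | cons y rest ih =>
    have hlab_rest : label ∉ rest := fun hr => hmem (List.mem_cons.2 (Or.inr hr))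
    have hy_ne : y ≠ label := fun he => hmem (List.mem_cons.2 (Or.inl he.symm))
    have hclosed : ∀ a, (a ∈ rest ∨ a = label ∨ pvReach R label a) →
        ∀ b, R.get? a = some b → (b ∈ rest ∨ b = label ∨ pvReach R label b) := by
      intro a ha b hb
      rcases ha with h1 | h1 | h1
      · rcases pvLinks_closed R rest label h.2 a h1 b hb with h2 | h2
        · exact Or.inl h2
        · exact Or.inr (Or.inl h2)
      · subst h1
        exact Or.inr (Or.inr ⟨1, by simp [pvIter, hb]⟩)
      · exact Or.inr (Or.inr (pvReach_trans R h1 ⟨1, by simp [pvIter, hb]⟩))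
    have hstart : rest.headD label ∈ rest ∨ rest.headD label = label ∨
        pvReach R label (rest.headD label) := by
      cases rest with
      | nil => exact Or.inr (Or.inl rfl)
      | cons z zs => exact Or.inl (List.mem_cons.2 (Or.inl rfl))
    have hnreach : ¬ pvReach R (rest.headD label) y := by
      rintro ⟨n, hn⟩
      have hyS := pvStepClosed R
        (fun z => z ∈ rest ∨ z = label ∨ pvReach R label z) hclosed n _ y hstart hn
      rcases hyS with h1 | h1 | h1
      · exact (List.nodup_cons.1 hnd).1 h1
      · exact hy_ne h1
      · obtain ⟨k, hk⟩ := h1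
        obtain ⟨m, hm⟩ := pvLinks_reach R (y :: rest) label h y (List.mem_cons.2 (Or.inl rfl))
        have hcyc : pvIter R (k + m) label = some label := by
          rw [pvIter_add, hk]; exact hm
        cases hkm : k + m with
        | zero =>
          have hk0 : k = 0 := by omega
          subst hk0
          simp [pvIter] at hk
          exact hy_ne hk.symm
        | succ t =>
          rw [hkm] at hcyc
          exact hnc t hcyc
    intro x hx
    rcases List.mem_cons.1 hx with rfl | hx'
    · have hstep : pvResolveA R PySem.Set.empty x =
          pvResolveA R (PySem.Set.add PySem.Set.empty x) (rest.headD label) :=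
        pvResolveA_go R _ x _ h.1 (pvContainsEmpty x)
      have hdrop : pvResolveA R (PySem.Set.add PySem.Set.empty x) (rest.headD label) =
          pvResolveA R PySem.Set.empty (rest.headD label) := by
        apply pvKey
        intro z hz
        have hzx : z ≠ x := fun he => hnreach (he ▸ hz)
        simp [pvContainsAdd, pvContainsEmpty, hzx]
      constructor
      · rw [hstep, hdrop]
        cases rest with
        | nil => exact hres
        | cons z zs =>
          exact (ih h.2 (List.nodup_cons.1 hnd).2 hlab_rest z (List.mem_cons.2 (Or.inl rfl))).1
      · intro n hcy
        simp only [pvIter, h.1] at hcy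
        exact hnreach ⟨n, hcy⟩
    · exact ih h.2 (List.nodup_cons.1 hnd).2 hlab_rest x hx'

-- ======== B-side walk machinery ========

-- recursive reference form of B's bounded walk loop
def pvWalkR (repl cache : PySem.Dict String String) (path : List String) (label : String) :
    List String × String :=
  if h : (cache.contains label || !(repl.contains label) || path.contains label) = true then
    (path, label)
  else pvWalkR repl cache (path ++ [label]) (repl.getD label "")
termination_by (repl.keys.filter (fun k => !(path.contains k))).length
decreasing_by
  apply pvFilterLt _ _ _ label
  · intro x hx
    simp only [Bool.not_eq_eq_eq_not, Bool.not_true, List.contains_append] at hx ⊢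
    rcases Bool.or_eq_false_iff.1 hx with ⟨h1, _⟩
    exact h1
  · simp only [Bool.or_eq_true, not_or, Bool.not_eq_true] at h
    have := h.1.2
    simp only [Bool.not_eq_false'] at this
    exact (PySem.Dict.contains_iff_mem_keys _ _).1 this
  · simp only [Bool.or_eq_true, not_or, Bool.not_eq_true] at h
    simpa using h.2
  · simp

theorem pvWalkR_stop (repl cache : PySem.Dict String String) (path : List String) (label : String)
    (h : (cache.contains label || !(repl.contains label) || path.contains label) = true) :
    pvWalkR repl cache path label = (path, label) := by
  rw [pvWalkR]; exact dif_pos h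

theorem pvWalkR_go (repl cache : PySem.Dict String String) (path : List String) (label : String)
    (h : (cache.contains label || !(repl.contains label) || path.contains label) = false) :
    pvWalkR repl cache path label = pvWalkR repl cache (path ++ [label]) (repl.getD label "") := by
  rw [pvWalkR]; exact dif_neg (by rw [h]; simp)

-- a fold that ignores its elements is function iteration
theorem pvFoldlIgnore {α β : Type} (f : β → β) (l : List α) (init : β) :
    l.foldl (fun s _ => f s) init = f^[l.length] init := by
  induction l generalizing init with
  | nil => rfl
  | cons x xs ih => simp [List.foldl_cons, ih, Function.iterate_succ_apply]

theorem pvStep_eq (repl cache : PySem.Dict String String) (p : List String) (l : String) :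
    pvWalkStep repl cache (p, l, false) =
      if cache.contains l || !(repl.contains l) || p.contains l then (p, l, true)
      else (p ++ [l], repl.getD l "", false) := by
  simp [pvWalkStep]

theorem pvStepDone (repl cache : PySem.Dict String String) (p : List String) (l : String) :
    pvWalkStep repl cache (p, l, true) = (p, l, true) := by
  simp [pvWalkStep]

theorem pvIterDone (repl cache : PySem.Dict String String) (n : Nat) (p : List String) (l : String) :
    (pvWalkStep repl cache)^[n] (p, l, true) = (p, l, true) := by
  induction n with
  | zero => rfl
  | succ k ih => rw [Function.iterate_succ_apply, pvStepDone]; exact ih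

-- enough fuel: the iterated loop body computes the recursive walk
theorem pvIterWalk (repl cache : PySem.Dict String String) :
    ∀ (n : Nat) (p : List String) (l : String),
      (repl.keys.filter (fun k => !(p.contains k))).length < n →
      ((pvWalkStep repl cache)^[n] (p, l, false)).1 = (pvWalkR repl cache p l).1 ∧
      ((pvWalkStep repl cache)^[n] (p, l, false)).2.1 = (pvWalkR repl cache p l).2 := by
  intro n
  induction n with
  | zero => intro p l h; omega
  | succ m ih =>
    intro p l h
    rw [Function.iterate_succ_apply]
    by_cases hc : (cache.contains l || !(repl.contains l) || p.contains l) = true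
    · rw [pvStep_eq, if_pos hc, pvIterDone, pvWalkR_stop repl cache p l hc]
      exact ⟨rfl, rfl⟩
    · have hcf : (cache.contains l || !(repl.contains l) || p.contains l) = false :=
        Bool.eq_false_iff.2 hc
      rw [pvStep_eq, if_neg (by rw [hcf]; simp), pvWalkR_go repl cache p l hcf]
      apply ih
      have hlt : ((repl.keys.filter (fun k => !((p ++ [l]).contains k))).length <
          (repl.keys.filter (fun k => !(p.contains k))).length) := by
        apply pvFilterLt _ _ _ l
        · intro x hx
          simp only [Bool.not_eq_eq_eq_not, Bool.not_true, List.contains_append] at hx ⊢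
          exact (Bool.or_eq_false_iff.1 hx).1
        · rcases Bool.or_eq_false_iff.1 (Bool.or_eq_false_iff.1 hcf).1 with ⟨_, hb⟩
          simp only [Bool.not_eq_false'] at hb
          exact (PySem.Dict.contains_iff_mem_keys _ _).1 hb
        · simpa using (Bool.or_eq_false_iff.1 hcf).2
        · simp
      omega

-- path[:path.index(label)] is the prefix before the first occurrence of label
theorem pvTakeIdx (q : List String) (L : String) (i : Nat)
    (h : PySem.List.index? q L = some i) :
    q.take i = q.takeWhile (fun z => z != L) := by
  induction q generalizing i with
  | nil => simp [PySem.List.index?] at h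
  | cons x rest ih =>
    by_cases hx : x = L
    · subst hx
      rw [PySem.List.index?_cons_self] at h
      cases h
      simp
    · rw [PySem.List.index?_cons_of_ne rest hx] at h
      cases hj : PySem.List.index? rest L with
      | none => rw [hj] at h; cases h
      | some j =>
        rw [hj] at h
        simp only [Option.map_some] at h
        cases h
        have hbne : (x != L) = true := bne_iff_ne.2 hx
        simp only [List.take_succ_cons, List.takeWhile_cons, hbne, if_true]
        rw [ih j hj]

-- properties of the recursive walk
theorem pvWalkR_props (repl cache : PySem.Dict String String) :
    ∀ (path : List String) (label : String),
      pvLinks repl path label → path.Nodup →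
      (∀ x ∈ path, cache.contains x = false) →
      pvLinks repl (pvWalkR repl cache path label).1 (pvWalkR repl cache path label).2 ∧
      (pvWalkR repl cache path label).1.Nodup ∧
      (∀ x ∈ (pvWalkR repl cache path label).1, cache.contains x = false) ∧
      (cache.contains (pvWalkR repl cache path label).2 = true ∨
        repl.contains (pvWalkR repl cache path label).2 = false ∨
        (pvWalkR repl cache path label).2 ∈ (pvWalkR repl cache path label).1) ∧
      (pvWalkR repl cache path label).1.headD (pvWalkR repl cache path label).2 =
        path.headD label := by
  intro path label
  induction path, label using pvWalkR.induct repl cache with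
  | case1 path label h =>
    intro hlinks hnd hunc
    rw [pvWalkR_stop repl cache path label h]
    refine ⟨hlinks, hnd, hunc, ?_, rfl⟩
    rcases Bool.or_eq_true _ _ ▸ h with h1 | h1
    · rcases Bool.or_eq_true _ _ ▸ h1 with h2 | h2
      · exact Or.inl h2
      · exact Or.inr (Or.inl (by simpa using h2))
    · exact Or.inr (Or.inr (by simpa using h1))
  | case2 path label h ih =>
    intro hlinks hnd hunc
    have hcf : (cache.contains label || !(repl.contains label) || path.contains label) = false :=
      Bool.eq_false_iff.2 h
    obtain ⟨h12, hpnc⟩ := Bool.or_eq_false_iff.1 hcf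
    obtain ⟨hcc, hrc⟩ := Bool.or_eq_false_iff.1 h12
    have hrc' : repl.contains label = true := by simpa using hrc
    have hnin : label ∉ path := by simpa using hpnc
    obtain ⟨v, hv⟩ : ∃ v, repl.get? label = some v := by
      rw [PySem.Dict.contains_eq_isSome_get?] at hrc'
      cases hg : repl.get? label with
      | none => rw [hg] at hrc'; cases hrc'
      | some v => exact ⟨v, rfl⟩
    have hgd : repl.getD label "" = v := by
      rw [PySem.Dict.getD_eq_get?_getD, hv]; rfl
    rw [pvWalkR_go repl cache path label hcf]
    have hlinks' : pvLinks repl (path ++ [label]) (repl.getD label "") := by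
      rw [hgd]; exact pvLinks_snoc repl path label v hlinks hv
    have hnd' : (path ++ [label]).Nodup := by
      rw [List.nodup_append]
      exact ⟨hnd, List.nodup_singleton _, by
        intro a ha b hb
        have hbl : b = label := by simpa using hb
        subst hbl
        exact fun he => hnin (he ▸ ha)⟩
    have hunc' : ∀ x ∈ path ++ [label], cache.contains x = false := by
      intro x hx
      rcases List.mem_append.1 hx with h1 | h1
      · exact hunc x h1
      · have : x = label := by simpa using h1
        subst this; exact hcc
    obtain ⟨a1, a2, a3, a4, a5⟩ := ih hlinks' hnd' hunc'
    exact ⟨a1, a2, a3, a4, by rw [a5, pvHeadD_snoc]⟩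

theorem pvGetDSome (c : PySem.Dict String String) (k v d : String)
    (h : c.get? k = some v) : c.getD k d = v := by
  rw [PySem.Dict.getD_eq_get?_getD, h]; rfl

theorem pvGetDNone (c : PySem.Dict String String) (k d : String)
    (h : c.get? k = none) : c.getD k d = d := by
  rw [PySem.Dict.getD_eq_get?_getD, h]; rfl

theorem pvNotContains_get?_none (c : PySem.Dict String String) (k : String)
    (h : c.contains k = false) : c.get? k = none :=
  (PySem.Dict.get?_eq_none_iff_contains c k).2 h

theorem pvContains_get?_some (c : PySem.Dict String String) (k : String)
    (h : c.contains k = true) : ∃ v, c.get? k = some v := by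
  rw [PySem.Dict.contains_eq_isSome_get?] at h
  cases hg : c.get? k with
  | none => rw [hg] at h; cases h
  | some v => exact ⟨v, rfl⟩

-- pvFillOne preserves the invariant, is monotone, and resolves its start key
theorem pvFillOne_spec (repl cache : PySem.Dict String String) (start : String)
    (hinv : pvInv repl cache) :
    pvInv repl (pvFillOne repl cache start) ∧ pvMono cache (pvFillOne repl cache start) ∧
    (pvFillOne repl cache start).getD start start = pvResolveA repl PySem.Set.empty start := by
  unfold pvFillOne
  by_cases hcs : cache.contains start = true
  · simp only [hcs, if_true]
    refine ⟨hinv, fun k v hv => hv, ?_⟩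
    obtain ⟨v, hv⟩ := pvContains_get?_some cache start hcs
    rw [pvGetDSome cache start v start hv]
    exact (hinv start v hv).1
  · have hcs' : cache.contains start = false := Bool.eq_false_iff.2 hcs
    simp only [hcs', Bool.false_eq_true, if_false]
    -- identify the bounded fold with the recursive walk
    have hlen : (PySem.List.pyRange 0 ((repl.size : Int) + 1) 1).length = repl.size + 1 := by
      rw [PySem.List.length_pyRange_one]
      omega
    have hm0 : (repl.keys.filter (fun k => !(([] : List String).contains k))).length <
        repl.size + 1 := by
      have h1 : (repl.keys.filter (fun k => !(([] : List String).contains k))).length ≤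
          repl.keys.length := List.length_filter_le _ _
      have h2 : repl.keys.length = repl.size := by
        simp [PySem.Dict.keys, PySem.Dict.size]
      omega
    have hfold : ((PySem.List.pyRange 0 ((repl.size : Int) + 1) 1).foldl
        (fun st _ => pvWalkStep repl cache st) (([] : List String), start, false)) =
        (pvWalkStep repl cache)^[repl.size + 1] (([] : List String), start, false) := by
      rw [pvFoldlIgnore, hlen]
    obtain ⟨hw1, hw2⟩ := pvIterWalk repl cache (repl.size + 1) [] start hm0
    rw [← hfold] at hw1 hw2
    obtain ⟨hlinks, hnd, hunc, hstop, hhead⟩ :=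
      pvWalkR_props repl cache [] start trivial List.nodup_nil (fun x hx => absurd hx (by simp))
    simp only [List.headD_nil] at hhead
    simp only [hw1, hw2]
    generalize hqdef : (pvWalkR repl cache [] start).1 = q at hlinks hnd hunc hstop hhead
    generalize hLdef : (pvWalkR repl cache [] start).2 = L at hlinks hnd hunc hstop hhead
    by_cases hmem : L ∈ q
    · -- cycle branch
      have hcontains : q.contains L = true := by simp [hmem]
      simp only [hcontains, if_true]
      obtain ⟨i, hi⟩ : ∃ i, PySem.List.index? q L = some i := by
        cases hg : PySem.List.index? q L with
        | none => exact absurd ((PySem.List.index?_eq_none_iff q L).1 hg) (by simp [hmem])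
        | some i => exact ⟨i, rfl⟩
      rw [hi]
      dsimp only
      have hslice : PySem.List.slice q none (some (i : Int)) = q.take i :=
        PySem.List.slice_to_natCast q i
      rw [hslice, pvTakeIdx q L i hi]
      obtain ⟨hres_head, hpre⟩ := pvCycleEnd repl q L hlinks hnd hmem
      refine ⟨?_, ?_, ?_⟩
      · intro k v hk
        rw [pvFoldlInsertGet] at hk
        split at hk
        · rename_i hktw
          cases hk
          exact ⟨(hpre k hktw).1.symm, (hpre k hktw).2⟩
        · exact hinv k v hk
      · intro k v hk
        rw [pvFoldlInsertGet]
        split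
        · rename_i hktw
          exfalso
          have hkq : k ∈ q := (List.takeWhile_sublist (p := fun z => z != L)).mem hktw
          have := hunc k hkq
          rw [PySem.Dict.contains_eq_isSome_get?, hk] at this
          cases this
        · exact hk
      · rw [PySem.Dict.getD_eq_get?_getD, pvFoldlInsertGet]
        by_cases hin : start ∈ q.takeWhile (fun z => z != L)
        · simp only [hin, if_true]
          rw [← hhead, hres_head]
          rfl
        · simp only [hin, if_false]
          have hqne : q ≠ [] := by
            intro he; rw [he] at hmem; cases hmem
          obtain ⟨x, rest, rfl⟩ := List.exists_cons_of_ne_nil hqne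
          simp only [List.headD_cons] at hhead hres_head
          have hsL : start = L := by
            by_contra hne
            apply hin
            rw [← hhead]
            have hbne : (x != L) = true := bne_iff_ne.2 (by rw [hhead]; exact hne)
            simp only [List.takeWhile_cons, hbne, if_true]
            exact List.mem_cons.2 (Or.inl rfl)
          rw [pvNotContains_get?_none cache start hcs']
          simp only [Option.getD_none]
          rw [← hhead, hres_head, hhead]
          exact hsL
    · -- line branch
      have hcontains : q.contains L = false := by simp [hmem]
      simp only [hcontains, Bool.false_eq_true, if_false]
      have hLend : pvResolveA repl PySem.Set.empty L = cache.getD L L ∧ pvNoCyc repl L := by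
        cases hg : cache.get? L with
        | some v =>
          rw [pvGetDSome cache L v L hg]
          exact ⟨(hinv L v hg).1.symm, (hinv L v hg).2⟩
        | none =>
          rw [pvGetDNone cache L L hg]
          have hnr : repl.contains L = false := by
            rcases hstop with h1 | h1 | h1
            · rw [PySem.Dict.contains_eq_isSome_get?, hg] at h1; cases h1
            · exact h1
            · exact absurd h1 hmem
          have hrn : repl.get? L = none := pvNotContains_get?_none repl L hnr
          refine ⟨pvResolveA_none repl _ L hrn, ?_⟩
          intro n hcy
          simp only [pvIter, hrn] at hcy
          exact absurd hcy (by simp)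
      have hline := pvLineEnd repl q L (cache.getD L L) hlinks hnd hmem hLend.1 hLend.2
      refine ⟨?_, ?_, ?_⟩
      · intro k v hk
        rw [pvFoldlInsertGet] at hk
        split at hk
        · rename_i hkq
          cases hk
          exact ⟨(hline k hkq).1.symm, (hline k hkq).2⟩
        · exact hinv k v hk
      · intro k v hk
        rw [pvFoldlInsertGet]
        split
        · rename_i hkq
          exfalso
          have := hunc k hkq
          rw [PySem.Dict.contains_eq_isSome_get?, hk] at this
          cases this
        · exact hk
      · rw [PySem.Dict.getD_eq_get?_getD, pvFoldlInsertGet]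
        by_cases hin : start ∈ q
        · simp only [hin, if_true, Option.getD_some]
          exact ((hline start hin).1).symm
        · simp only [hin, if_false]
          have hqnil : q = [] := by
            cases hq2 : q with
            | nil => rfl
            | cons x rest =>
              exfalso
              rw [hq2] at hhead hin
              simp only [List.headD_cons] at hhead
              exact hin (hhead ▸ List.mem_cons.2 (Or.inl rfl))
          rw [hqnil] at hhead
          simp only [List.headD_nil] at hhead
          rw [pvNotContains_get?_none cache start hcs']
          rw [hhead] at hLend
          rw [pvGetDNone cache start start (pvNotContains_get?_none cache start hcs')] at hLend
          simp only [Option.getD_none]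
          exact hLend.1.symm

-- the key-fold produces a full, correct resolution table
theorem pvFoldFill (repl : PySem.Dict String String) (ks : List String) :
    ∀ cache : PySem.Dict String String, pvInv repl cache →
      pvInv repl (ks.foldl (fun c k => pvFillOne repl c k) cache) ∧
      pvMono cache (ks.foldl (fun c k => pvFillOne repl c k) cache) ∧
      ∀ k ∈ ks, (ks.foldl (fun c k => pvFillOne repl c k) cache).getD k k =
        pvResolveA repl PySem.Set.empty k := by
  induction ks with
  | nil => intro cache hinv; exact ⟨hinv, fun k v hv => hv, fun k hk => absurd hk (by simp)⟩
  | cons k ks ih =>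
    intro cache hinv
    obtain ⟨hinv1, hmono1, hres1⟩ := pvFillOne_spec repl cache k hinv
    obtain ⟨hinv2, hmono2, hres2⟩ := ih (pvFillOne repl cache k) hinv1
    simp only [List.foldl_cons]
    refine ⟨hinv2, fun a v hv => hmono2 a v (hmono1 a v hv), ?_⟩
    intro a ha
    rcases List.mem_cons.1 ha with rfl | ha'
    · -- stability of the resolved key through the rest of the fold
      cases hg : (pvFillOne repl cache a).get? a with
      | some v =>
        have hv2 := hmono2 a v hg
        rw [PySem.Dict.getD_eq_get?_getD, hv2, Option.getD_some]
        rw [PySem.Dict.getD_eq_get?_getD, hg, Option.getD_some] at hres1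
        exact hres1
      | none =>
        rw [PySem.Dict.getD_eq_get?_getD, hg] at hres1
        simp only [Option.getD_none] at hres1
        cases hg2 : (ks.foldl (fun c k => pvFillOne repl c k) (pvFillOne repl cache a)).get? a with
        | some w =>
          rw [PySem.Dict.getD_eq_get?_getD, hg2, Option.getD_some]
          exact ((hinv2 a w hg2).1).symm.symm
        | none =>
          rw [PySem.Dict.getD_eq_get?_getD, hg2]
          simp only [Option.getD_none]
          exact hres1
    · exact hres2 a ha'

-- pointwise: the final table looks up A's resolve value for EVERY string
theorem pvCacheAll (repl : PySem.Dict String String) (x : String) :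
    (repl.keys.foldl (fun c k => pvFillOne repl c k) PySem.Dict.empty).getD x x =
      pvResolveA repl PySem.Set.empty x := by
  have hinv0 : pvInv repl PySem.Dict.empty := by
    intro k v hv
    rw [PySem.Dict.get?_empty] at hv
    cases hv
  obtain ⟨hinv, hmono, hres⟩ := pvFoldFill repl repl.keys PySem.Dict.empty hinv0
  by_cases hx : x ∈ repl.keys
  · exact hres x hx
  · have hrn : repl.get? x = none := (PySem.Dict.get?_eq_none_iff_not_mem_keys repl x).2 hx
    have hrx : pvResolveA repl PySem.Set.empty x = x := pvResolveA_none repl _ x hrn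
    rw [hrx]
    cases hg : (repl.keys.foldl (fun c k => pvFillOne repl c k) PySem.Dict.empty).get? x with
    | some v =>
      rw [PySem.Dict.getD_eq_get?_getD, hg]
      have := (hinv x v hg).1
      rw [hrx] at this
      exact this
    | none => rw [PySem.Dict.getD_eq_get?_getD, hg]; rfl

-- ======== replacements tables agree ========

theorem pvSquaresContains (gm : PySem.Dict String (String × String)) (hnd : gm.keys.Nodup)
    (a : String) :
    PySem.Set.contains (pvSquares gm) a = true ↔ ∃ p, gm.get? a = some p ∧ p.1 = p.2 := by
  unfold pvSquares
  rw [PySem.Set.contains_iff]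
  rw [PySem.Set.mem_ofList]
  constructor
  · intro h
    obtain ⟨kv, hkv, rfl⟩ := List.mem_map.1 h
    obtain ⟨hmem, hcond⟩ := List.mem_filter.1 hkv
    refine ⟨kv.2, ?_, by simpa using hcond⟩
    exact PySem.Dict.get?_of_mem_items gm (by simpa using hmem) hnd
  · rintro ⟨p, hp, he⟩
    have hitems : (a, p) ∈ gm.items := PySem.Dict.mem_items_of_get?_eq_some gm hp
    apply List.mem_map.2
    refine ⟨(a, p), List.mem_filter.2 ⟨hitems, by simpa using he⟩, rfl⟩

theorem pvReplEq (gates : List (String × String × String))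
    (gm : PySem.Dict String (String × String)) (hnd : gm.keys.Nodup) :
    pvReplA gates gm = pvReplB gates gm (pvSquares gm) := by
  unfold pvReplA pvReplB
  suffices hgen : ∀ init : PySem.Dict String String,
      gates.foldl (fun r g =>
        if g.2.1 == g.2.2 then
          match gm.get? g.2.1 with
          | some p =>
              if p.1 == p.2 then
                if pvIsOutputLabel g.1 then r else r.insert g.1 p.1
              else r
          | none => r
        else r) init =
      gates.foldl (fun r g =>
        if g.2.1 == g.2.2 && PySem.Set.contains (pvSquares gm) g.2.1 && !(pvIsOutputLabel g.1) then
          r.insert g.1 (gm.getD g.2.1 ("", "")).1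
        else r) init by
    exact hgen PySem.Dict.empty
  intro init
  induction gates generalizing init with
  | nil => rfl
  | cons g rest ih =>
    simp only [List.foldl_cons]
    rw [show (if g.2.1 == g.2.2 then
          match gm.get? g.2.1 with
          | some p =>
              if p.1 == p.2 then
                if pvIsOutputLabel g.1 then init else init.insert g.1 p.1
              else init
          | none => init
        else init) =
        (if g.2.1 == g.2.2 && PySem.Set.contains (pvSquares gm) g.2.1 && !(pvIsOutputLabel g.1) then
          init.insert g.1 (gm.getD g.2.1 ("", "")).1
        else init) from ?_]
    · exact ih _
    cases h : gm.get? g.2.1 with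
    | none =>
      have hsq : PySem.Set.contains (pvSquares gm) g.2.1 = false := by
        apply Bool.eq_false_iff.2
        intro hc
        obtain ⟨p, hp, _⟩ := (pvSquaresContains gm hnd g.2.1).1 hc
        rw [h] at hp; cases hp
      have hsq' : g.2.1 ∉ pvSquares gm := by simpa using hsq
      by_cases heq : (g.2.1 == g.2.2) = true <;> simp [heq, h, hsq']
    | some p =>
      have hgd : gm.getD g.2.1 ("", "") = p := by
        rw [PySem.Dict.getD_eq_get?_getD, h]; rfl
      by_cases hin : (p.1 == p.2) = true
      · have hsq : g.2.1 ∈ pvSquares gm := (PySem.Set.contains_iff _ _).1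
          ((pvSquaresContains gm hnd g.2.1).2 ⟨p, h, by simpa using hin⟩)
        by_cases heq : (g.2.1 == g.2.2) = true <;>
          by_cases hout : pvIsOutputLabel g.1 = true <;>
            simp [heq, hin, hout, h, hsq, hgd]
      · have hsq : g.2.1 ∉ pvSquares gm := by
          intro hc
          obtain ⟨p', hp', he'⟩ := (pvSquaresContains gm hnd g.2.1).1
            ((PySem.Set.contains_iff _ _).2 hc)
          rw [h] at hp'
          cases hp'
          exact hin (by simpa using he')
        by_cases heq : (g.2.1 == g.2.2) = true <;> simp [heq, hin, h, hsq]

-- gate_map has unique keys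
theorem pvGateMapNodup (gates : List (String × String × String)) :
    (pvGateMap gates).keys.Nodup := by
  unfold pvGateMap
  exact PySem.Dict.nodup_keys_foldl_insert_key gates (fun g => g.1)
    (fun d g => (g.2.1, g.2.2)) PySem.Dict.empty PySem.Dict.nodup_keys_empty

-- ===== VERDICT (by name: the statement is the Claim_ definition above) =====
theorem optimize_and_simplification_spec : Claim_equal_optimize_and_simplification := by
  intro gates _
  unfold Spec_optimize_and_simplification
  unfold optimize_and_simplification optimize_and_simplification_alt
  dsimp only
  rw [← pvReplEq gates (pvGateMap gates) (pvGateMapNodup gates)]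
  set gm := pvGateMap gates with hgm
  set repl := pvReplA gates gm with hrepl
  set cache := repl.keys.foldl (fun c k => pvFillOne repl c k) PySem.Dict.empty with hcache
  have hpoint : ∀ x, cache.getD x x = pvResolveA repl PySem.Set.empty x :=
    fun x => pvCacheAll repl x
  by_cases hz : (repl.size == 0) = true
  · -- empty replacements: A returns gates; B rebuilds them unchanged
    have hsize : repl.size = 0 := by simpa using hz
    have hitems : repl.items = [] := by
      have : repl.items.length = 0 := hsize
      exact List.length_eq_zero_iff.1 this
    have hcontains : ∀ k, repl.contains k = false := by
      intro k
      have hkeys : repl.keys = [] := by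
        show repl.items.map _ = []
        rw [hitems]; rfl
      rw [PySem.Dict.contains_eq_decide_mem_keys, hkeys]
      simp
    simp only [hz, if_true]
    have hfilter : gates.filter (fun g => !(repl.contains g.1)) = gates :=
      List.filter_eq_self.2 (fun g _ => by rw [hcontains g.1]; rfl)
    rw [hfilter]
    have hrx : ∀ x, pvResolveA repl PySem.Set.empty x = x := by
      intro x
      apply pvResolveA_none
      rw [PySem.Dict.get?_eq_none_iff_contains]
      exact hcontains x
    have hmap : gates.map (fun g => (g.1, cache.getD g.2.1 g.2.1, cache.getD g.2.2 g.2.2)) =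
        gates := by
      have h1 : gates.map (fun g => (g.1, cache.getD g.2.1 g.2.1, cache.getD g.2.2 g.2.2)) =
          gates.map id := by
        apply List.map_congr_left
        intro g _
        rw [hpoint, hpoint, hrx, hrx]
        rfl
      rw [h1, List.map_id]
    rw [hmap]
  · simp only [hz, Bool.false_eq_true, if_false]
    -- A's append fold is a filter+map
    have hflip : gates.foldl (fun acc g =>
        if repl.contains g.1 then acc
        else acc ++ [(g.1, pvResolveA repl PySem.Set.empty g.2.1,
                           pvResolveA repl PySem.Set.empty g.2.2)]) [] =
      gates.foldl (fun acc g =>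
        if !(repl.contains g.1) then acc ++ [(g.1, pvResolveA repl PySem.Set.empty g.2.1,
            pvResolveA repl PySem.Set.empty g.2.2)] else acc) [] :=
      PySem.List.foldl_congr_mem gates _ _ [] (by
        intro acc g _
        by_cases hc : repl.contains g.1 = true <;> simp [hc])
    rw [hflip, PySem.List.foldl_append_if]
    simp only [List.nil_append]
    apply List.map_congr_left
    intro g _
    rw [hpoint, hpoint]
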